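-- pv_equiv track=rewrite | github.com/3-1415926/EPIJudge | epi_judge_python_my_solutions/enumerate_palindromic_decompositions.py | palindrome_decompositions
-- ===== SOURCE A (Python) =====
-- from typing import List
--
-- def palindrome_decompositions(text: str) -> List[List[str]]:
--     def recursive_decompositions(start: int):
--         if start >= len(text):
--             results.append(cur_result.copy())
--             return
--         for i in range(start, len(text)):
--             prefix = text[start:i + 1]
--             if prefix == prefix[::-1]:
--                 cur_result.append(prefix)
--                 recursive_decompositions(i + 1)
--                 cur_result.pop()
--     cur_result = []
--     results = []
--     recursive_decompositions(0)
--     return results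
-- ===== SOURCE B (Python) =====
-- def palindrome_decompositions(text):
--     # Bottom-up DP: table[j] holds all palindromic decompositions of the
--     # suffix starting at position (start-of-table + j); built from the end.
--     n = len(text)
--     table = [[[]]]  # decompositions of text[n:] : one empty decomposition
--     for start in range(n - 1, -1, -1):
--         entry = []
--         for i in range(start, n):
--             prefix = text[start:i + 1]
--             if prefix == prefix[::-1]:
--                 entry.extend([prefix] + d for d in table[i - start])
--         table.insert(0, entry)
--     return table[0]
-- ===== Notes on version B (the rewrite author's own statement) =====
-- stated objective: alternative
-- what changed: Replaces the mutable-accumulator backtracking recursion (shared cur_result/results lists mutated in place) by an iterative bottom-up dynamic-programming table built from the end of the string, where table[j] holds all decompositions of the corresponding suffix.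
import Mathlib
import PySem

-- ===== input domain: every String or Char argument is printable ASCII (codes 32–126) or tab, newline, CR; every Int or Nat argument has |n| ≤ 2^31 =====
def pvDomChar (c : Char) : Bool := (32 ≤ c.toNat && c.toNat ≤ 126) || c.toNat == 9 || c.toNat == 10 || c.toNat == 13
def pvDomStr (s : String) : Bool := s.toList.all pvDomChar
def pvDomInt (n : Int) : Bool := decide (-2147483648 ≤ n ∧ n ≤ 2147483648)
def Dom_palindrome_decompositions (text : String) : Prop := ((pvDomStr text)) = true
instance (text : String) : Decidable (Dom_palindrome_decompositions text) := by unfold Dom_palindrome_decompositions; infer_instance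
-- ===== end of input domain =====

-- B replaces A's mutable-accumulator backtracking by an iterative bottom-up DP table of
-- suffix decompositions (alternative decomposition, same results in the same order).

-- ===== PORT A =====
-- A's mutable `cur_result`/`results` become explicit accumulator parameters; the for-loop is a
-- foldl over the attached range (`attach` carries membership only for the termination proof).
def pvPalA (t : List Char) (start : Nat) (cur : List String) (results : List (List String)) :
    List (List String) :=
  if _h : start ≥ t.length then results ++ [cur]
  else
    (List.range' start (t.length - start)).attach.foldl
      (fun res x =>
        -- prefix = text[start:i+1]; `p = p.reverse` is `prefix == prefix[::-1]`
        -- (exact by PySem.List.slice?_none_none_neg_one)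
        let p := PySem.List.slice t (some (start : Int)) (some ((x.1 + 1 : Nat) : Int))
        if p = p.reverse then pvPalA t (x.1 + 1) (cur ++ [String.ofList p]) res else res)
      results
termination_by t.length - start
decreasing_by
  have hx := List.mem_range'_1.mp x.2
  omega

def palindrome_decompositions (text : String) : List (List String) :=
  pvPalA text.toList 0 [] []

-- ===== PORT B =====
-- inner loop of Source B: one table entry (all decompositions of text[start:]) from the
-- already-built entries for start+1 .. n (table[j] = decompositions of text[start+1+j:])
def pvPalBEntry (t : List Char) (start : Nat) (table : List (List (List String))) :
    List (List String) :=
  (List.range' start (t.length - start)).flatMap (fun i =>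
    let p := PySem.List.slice t (some (start : Int)) (some ((i + 1 : Nat) : Int))
    if p = p.reverse then (table.getD (i - start) []).map (fun d => String.ofList p :: d) else [])

-- Source B's `for start in range(n-1, -1, -1): table.insert(0, entry)`: k entries already built
def pvPalBTable (t : List Char) : Nat → List (List (List String))
  | 0 => [[[]]]
  | k + 1 => pvPalBEntry t (t.length - (k + 1)) (pvPalBTable t k) :: pvPalBTable t k

def palindrome_decompositions_alt (text : String) : List (List String) :=
  (pvPalBTable text.toList text.toList.length).getD 0 []

-- ===== PRECONDITION & SPEC =====
def Spec_palindrome_decompositions (text : String) (out : List (List String)) : Prop := out = palindrome_decompositions_alt text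
instance (text : String) (out : List (List String)) : Decidable (Spec_palindrome_decompositions text out) := by unfold Spec_palindrome_decompositions; infer_instance

-- ===== CLAIM (what is proved, stated in full; the proofs are below) =====
def Claim_equal_palindrome_decompositions : Prop := ∀ (text : String), Dom_palindrome_decompositions text → Spec_palindrome_decompositions text (palindrome_decompositions text)

-- ===== LEMMAS AND PROOFS =====

-- mathematical reference value: all palindromic decompositions of t[start:], in A's order
def pvDecomp (t : List Char) (start : Nat) : List (List String) :=
  if h : start ≥ t.length then [[]]
  else
    (List.range' start (t.length - start)).attach.flatMap
      (fun x =>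
        let p := PySem.List.slice t (some (start : Int)) (some ((x.1 + 1 : Nat) : Int))
        if p = p.reverse then (pvDecomp t (x.1 + 1)).map (fun d => String.ofList p :: d) else [])
termination_by t.length - start
decreasing_by
  have hx := List.mem_range'_1.mp x.2
  omega

lemma pvFoldl_flatMap {β γ : Type} (l : List β) (F : List γ → β → List γ) (G : β → List γ)
    (h : ∀ res x, x ∈ l → F res x = res ++ G x) :
    ∀ acc, l.foldl F acc = acc ++ l.flatMap G := by
  induction l with
  | nil => simp
  | cons a l ih =>
    intro acc
    rw [List.foldl_cons, List.flatMap_cons, h _ a (List.mem_cons_self),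
      ih (fun res x hx => h res x (List.mem_cons_of_mem _ hx))]
    simp

lemma pvFlatMap_congr {α β : Type} {l : List α} {f g : α → List β}
    (h : ∀ x ∈ l, f x = g x) : l.flatMap f = l.flatMap g := by
  induction l with
  | nil => rfl
  | cons a l ih =>
    rw [List.flatMap_cons, List.flatMap_cons, h a (List.mem_cons_self),
      ih (fun x hx => h x (List.mem_cons_of_mem _ hx))]

lemma pvFlatMap_attach {α β : Type} (l : List α) (f : α → List β) :
    l.attach.flatMap (fun x => f x.1) = l.flatMap f := by
  conv_rhs => rw [← List.attach_map_subtype_val l]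
  rw [List.flatMap_map]

lemma pvPalA_eq (t : List Char) :
    ∀ (start : Nat) (cur : List String) (results : List (List String)),
      pvPalA t start cur results = results ++ (pvDecomp t start).map (fun d => cur ++ d) := by
  have main : ∀ (fuel start : Nat), t.length - start ≤ fuel →
      ∀ cur results,
        pvPalA t start cur results = results ++ (pvDecomp t start).map (fun d => cur ++ d) := by
    intro fuel
    induction fuel with
    | zero =>
      intro start hs cur results
      have h : start ≥ t.length := by omega
      rw [pvPalA, pvDecomp, dif_pos h, dif_pos h]
      simp
    | succ n ih =>
      intro start hs cur results
      rw [pvPalA, pvDecomp]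
      by_cases h : start ≥ t.length
      · rw [dif_pos h, dif_pos h]; simp
      · rw [dif_neg h, dif_neg h]
        rw [pvFoldl_flatMap _ _
          (fun x =>
            let p := PySem.List.slice t (some (start : Int)) (some ((x.1 + 1 : Nat) : Int))
            if p = p.reverse then
              (pvDecomp t (x.1 + 1)).map (fun d => (cur ++ [String.ofList p]) ++ d) else [])]
        · rw [List.map_flatMap]
          congr 1
          apply pvFlatMap_congr
          intro x hx
          simp only []
          split
          · simp [List.map_map, Function.comp]
          · simp
        · intro res x hx
          have hm := List.mem_range'_1.mp x.2
          simp only []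
          split
          · rw [ih (x.1 + 1) (by omega) (cur ++ [String.ofList _]) res]
          · simp
  intro start; exact main (t.length - start) start le_rfl

lemma pvPalBEntry_eq (t : List Char) (start : Nat) :
    pvPalBEntry t start ((List.range' (start + 1) (t.length - start)).map (pvDecomp t)) =
      (List.range' start (t.length - start)).flatMap (fun i =>
        let p := PySem.List.slice t (some (start : Int)) (some ((i + 1 : Nat) : Int))
        if p = p.reverse then (pvDecomp t (i + 1)).map (fun d => String.ofList p :: d) else []) := by
  rw [pvPalBEntry]
  apply pvFlatMap_congr
  intro i hi
  have hm := List.mem_range'_1.mp hi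
  have hlt : i - start < ((List.range' (start + 1) (t.length - start)).map (pvDecomp t)).length := by
    simp; omega
  have : ((List.range' (start + 1) (t.length - start)).map (pvDecomp t)).getD (i - start) [] =
      pvDecomp t (i + 1) := by
    rw [List.getD_eq_getElem _ _ hlt]
    simp only [List.getElem_map, List.getElem_range']
    congr 1
    omega
  simp only [this]

lemma pvDecomp_lt (t : List Char) (start : Nat) (h : ¬ start ≥ t.length) :
    pvDecomp t start =
      (List.range' start (t.length - start)).flatMap (fun i =>
        let p := PySem.List.slice t (some (start : Int)) (some ((i + 1 : Nat) : Int))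
        if p = p.reverse then (pvDecomp t (i + 1)).map (fun d => String.ofList p :: d) else []) := by
  rw [pvDecomp, dif_neg h]
  exact pvFlatMap_attach (List.range' start (t.length - start))
    (fun i =>
      let p := PySem.List.slice t (some (start : Int)) (some ((i + 1 : Nat) : Int))
      if p = p.reverse then (pvDecomp t (i + 1)).map (fun d => String.ofList p :: d) else [])

lemma pvPalBTable_eq (t : List Char) :
    ∀ k, k ≤ t.length →
      pvPalBTable t k = (List.range' (t.length - k) (k + 1)).map (pvDecomp t) := by
  intro k
  induction k with
  | zero =>
    intro _
    simp [pvPalBTable, List.range', pvDecomp]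
  | succ k ih =>
    intro hk
    have hidx : t.length - (k + 1) + 1 = t.length - k := by omega
    rw [pvPalBTable, ih (by omega)]
    conv_rhs => rw [List.range'_succ, List.map_cons, hidx]
    congr 1
    rw [show (List.range' (t.length - k) (k + 1)) =
        (List.range' (t.length - (k + 1) + 1) (t.length - (t.length - (k + 1)))) from by
      rw [hidx]; congr 1; omega]
    rw [pvPalBEntry_eq, ← pvDecomp_lt t _ (by omega)]

-- ===== VERDICT (by name: the statement is the Claim_ definition above) =====
theorem palindrome_decompositions_spec : Claim_equal_palindrome_decompositions := by
  intro text _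
  unfold Spec_palindrome_decompositions palindrome_decompositions palindrome_decompositions_alt
  rw [pvPalA_eq, pvPalBTable_eq _ _ le_rfl]
  simp [List.range'_succ]
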